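-- pv_equiv track=rewrite | github.com/VladimirBaryshev/LeetCode | RusComps/Yandex_1.py | f
-- ===== SOURCE A (Python) =====
-- from typing import defaultdict
--
-- def f(s):
--
--     if len(s) == 0:
--         return []
--
--     d = defaultdict(list)
--     substr = s[0]
--
--     for i in range(1, len(s)):
--         if substr[-1] != s[i]:
--             d[substr[-1]].append(len(substr))
--             substr = s[i]
--         else:
--             substr += s[i]
--     d[substr[-1]].append(len(substr))
--
--     return [(k, max(v)) for k,v in d.items()]
-- ===== SOURCE B (Python) =====
-- def f(s):
--     out = []
--     for c in dict.fromkeys(s):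
--         best = 0
--         i = 0
--         while i < len(s):
--             if s[i] == c:
--                 j = i
--                 while j < len(s) and s[j] == c:
--                     j += 1
--                 best = max(best, j - i)
--                 i = j
--             else:
--                 i += 1
--         out.append((c, best))
--     return out
-- ===== Notes on version B (the rewrite author's own statement) =====
-- stated objective: alternative
-- what changed: Replaces A's single left-to-right pass that grows a run buffer and appends every run length into a defaultdict keyed by character with a per-distinct-character strategy: for each character in first-appearance order (dict.fromkeys) the whole string is rescanned with two index pointers, tracking only the running maximum run length for that character.
import Mathlib
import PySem

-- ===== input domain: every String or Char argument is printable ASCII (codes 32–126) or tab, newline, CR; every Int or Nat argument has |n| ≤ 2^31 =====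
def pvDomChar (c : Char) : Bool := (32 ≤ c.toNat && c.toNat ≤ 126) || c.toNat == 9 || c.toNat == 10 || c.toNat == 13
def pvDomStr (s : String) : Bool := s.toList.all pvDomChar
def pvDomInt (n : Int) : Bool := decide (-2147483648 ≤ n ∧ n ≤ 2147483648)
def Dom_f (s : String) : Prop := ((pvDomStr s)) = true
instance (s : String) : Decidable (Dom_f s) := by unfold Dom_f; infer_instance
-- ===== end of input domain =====

-- B replaces A's single-pass run-builder (a defaultdict collecting every run length) by an
-- independent per-distinct-character rescan of the whole string with a running maximum.

-- ===== PORT A =====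
-- A's loop state `substr` is always a run of ONE repeated character; it is carried as that
-- character `lastc` (= substr[-1], a 1-char string in Python, rendered back via String.mk at
-- the end) and its length `klen` (= len(substr)).  The trailing
-- `d[substr[-1]].append(len(substr))` after the for-loop is the [] base case here.
-- defaultdict(list) append = Dict.modify with default [].
def loopA (d : PySem.Dict Char (List Int)) (lastc : Char) (klen : Nat) : List Char → PySem.Dict Char (List Int)
  | [] => d.modify lastc [] (fun v => v ++ [(klen : Int)])
  | ch :: rest =>
    if lastc ≠ ch then
      loopA (d.modify lastc [] (fun v => v ++ [(klen : Int)])) ch 1 rest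
    else
      loopA d lastc (klen + 1) rest

-- `max(v)` on the (always nonempty) value lists is PySem.List.max?; the none branch is unreachable.
def f (s : String) : List (String × Int) :=
  match s.toList with
  | [] => []
  | c :: rest =>
    ((loopA PySem.Dict.empty c 1 rest).items).map
      (fun p => (String.mk [p.1],
        match PySem.List.max? p.2 (fun x => x) with
        | some m => m
        | none => 0))

-- ===== PORT B =====
-- B's inner `while` pair: the j-scan over a run of c is takeWhile/dropWhile; best = max(best, j-i).
def bestRun (c : Char) (best : Int) : List Char → Int
  | [] => best
  | x :: xs =>
    if x = c then
      bestRun c (max best (((xs.takeWhile (fun y => y = c)).length : Int) + 1)) (xs.dropWhile (fun y => y = c))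
    else
      bestRun c best xs
termination_by l => l.length
decreasing_by
  · have := List.length_dropWhile_le (fun y => y = c) xs
    simp; omega
  · simp

-- dict.fromkeys(s) iteration = PySem.List.dedup (first occurrences, in order)
def f_alt (s : String) : List (String × Int) :=
  (PySem.List.dedup s.toList).map (fun c => (String.mk [c], bestRun c 0 s.toList))

-- ===== PRECONDITION & SPEC =====
def Spec_f (s : String) (out : List (String × Int)) : Prop := out = f_alt s
instance (s : String) (out : List (String × Int)) : Decidable (Spec_f s out) := by unfold Spec_f; infer_instance

-- ===== CLAIM (what is proved, stated in full; the proofs are below) =====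
def Claim_equal_f : Prop := ∀ (s : String), Dom_f s → Spec_f s (f s)

-- ===== LEMMAS AND PROOFS =====

-- run-length encoding of a list: the maximal runs (char, length), in order (proof-only helper)
def rle : List Char → List (Char × Int)
  | [] => []
  | x :: xs => (x, ((xs.takeWhile (fun y => y = x)).length : Int) + 1) :: rle (xs.dropWhile (fun y => y = x))
termination_by l => l.length
decreasing_by
  have := List.length_dropWhile_le (fun y => y = x) xs
  simp; omega

-- the lengths of the maximal runs of c, in order
def runLengths (c : Char) (l : List Char) : List Int :=
  ((rle l).filter (fun p => p.1 == c)).map (fun p => p.2)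

-- the run list A still has "open": the current run (c, n) merged with the runs of the rest
def mergeFirst (c : Char) (n : Nat) : List (Char × Int) → List (Char × Int)
  | [] => [((c : Char), (n : Int))]
  | (c', m) :: rs => if c' = c then (c, (n : Int) + m) :: rs else ((c : Char), (n : Int)) :: (c', m) :: rs

def step (d : PySem.Dict Char (List Int)) (p : Char × Int) : PySem.Dict Char (List Int) :=
  d.modify p.1 [] (fun v => v ++ [p.2])

lemma mergeFirst_rle (c : Char) (n : Nat) (xs : List Char) :
    mergeFirst c n (rle xs)
      = (c, (n : Int) + (xs.takeWhile (fun y => y = c)).length) :: rle (xs.dropWhile (fun y => y = c)) := by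
  cases xs with
  | nil => simp [rle, mergeFirst]
  | cons y ys =>
    by_cases h : y = c
    · subst h
      rw [rle]
      simp [mergeFirst]
    · simp only [List.takeWhile_cons, List.dropWhile_cons, h, decide_false]
      rw [rle]
      simp [mergeFirst, h]
      rw [rle]

lemma loopA_eq (l : List Char) : ∀ (d : PySem.Dict Char (List Int)) (c : Char) (n : Nat),
    loopA d c n l = (mergeFirst c n (rle l)).foldl step d := by
  induction l with
  | nil =>
    intro d c n
    rw [rle]
    simp [loopA, mergeFirst, step]
  | cons ch rest ih =>
    intro d c n
    by_cases h : c = ch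
    · subst h
      rw [loopA]
      simp only [ne_eq, not_true_eq_false, if_false, ih]
      rw [mergeFirst_rle, mergeFirst_rle]
      simp only [List.takeWhile_cons, List.dropWhile_cons, decide_true, if_true, List.length_cons]
      congr 2
      push_cast
      ring_nf
    · rw [loopA]
      simp only [ne_eq, h, not_false_eq_true, if_true, ih]
      have h2 : mergeFirst c n (rle (ch :: rest))
          = ((c : Char), (n : Int)) :: mergeFirst ch 1 (rle rest) := by
        rw [rle, mergeFirst_rle]
        simp [mergeFirst, Ne.symm h]
        omega
      rw [h2, List.foldl_cons]
      rfl

-- dropping a prefix of copies of x ≠ c does not change the c-runs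
lemma runLengths_dropWhile (c x : Char) (hxc : x ≠ c) (xs : List Char) :
    runLengths c (xs.dropWhile (fun y => y = x)) = runLengths c xs := by
  cases xs with
  | nil => rfl
  | cons y ys =>
    by_cases h : y = x
    · subst h
      rw [List.dropWhile_cons]
      simp only [decide_true, if_true]
      unfold runLengths
      rw [rle]
      simp [hxc]
    · rw [List.dropWhile_cons]
      simp [h]

lemma bestRun_eq (c : Char) (b : Int) (l : List Char) :
    bestRun c b l = (runLengths c l).foldl max b := by
  fun_induction bestRun c b l with
  | case1 a1 => simp [runLengths, rle]
  | case2 a1 a2 a3 =>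
    rw [a3]
    unfold runLengths
    rw [rle]
    simp [List.foldl_cons]
  | case3 a1 a2 a3 =>
    rename_i h ih
    rw [ih]
    have h1 : runLengths c (a2 :: a3) = runLengths c (a3.dropWhile (fun y => y = a2)) := by
      unfold runLengths
      rw [rle]
      simp [h]
    rw [h1, runLengths_dropWhile c a2 h a3]

lemma rle_pos (l : List Char) : ∀ p ∈ rle l, 1 ≤ p.2 := by
  fun_induction rle l with
  | case1 => simp
  | case2 x xs ih =>
    intro p hp
    rcases List.mem_cons.mp hp with h | h
    · subst h; simp
    · exact ih p h

lemma foldl_add_const (x : Char) (t : List Char) (h : ∀ y ∈ t, y = x) :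
    ∀ acc : PySem.Set Char, x ∈ acc → t.foldl PySem.Set.add acc = acc := by
  induction t with
  | nil => intro acc _; rfl
  | cons y ts ih =>
    intro acc hx
    have hy : y = x := h y (List.mem_cons_self)
    subst hy
    have hc : PySem.Set.add acc y = acc := by
      simp [PySem.Set.add, PySem.Set.contains, hx]
    rw [List.foldl_cons, hc]
    exact ih (fun z hz => h z (List.mem_cons_of_mem _ hz)) acc hx

lemma foldl_add_rle_chars (l : List Char) : ∀ acc : PySem.Set Char,
    ((rle l).map (fun p => p.1)).foldl PySem.Set.add acc = l.foldl PySem.Set.add acc := by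
  fun_induction rle l with
  | case1 => intro acc; rfl
  | case2 x xs ih =>
    intro acc
    rw [List.map_cons, List.foldl_cons, ih]
    conv_rhs => rw [List.foldl_cons, ← List.takeWhile_append_dropWhile (p := fun y => decide (y = x)) (l := xs)]
    rw [List.foldl_append]
    congr 1
    refine (foldl_add_const x _ ?_ _ ?_).symm
    · intro y hy
      simpa using List.mem_takeWhile_imp hy
    · exact (PySem.Set.mem_add _ _ _).mpr (Or.inr rfl)

lemma ofList_rle_chars (l : List Char) :
    PySem.Set.ofList ((rle l).map (fun p => p.1)) = PySem.Set.ofList l := by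
  rw [PySem.Set.ofList_eq_foldl, PySem.Set.ofList_eq_foldl]
  exact foldl_add_rle_chars l []

-- ===== VERDICT (by name: the statement is the Claim_ definition above) =====
theorem f_spec : Claim_equal_f := by
  intro s _
  unfold Spec_f
  cases hl : s.toList with
  | nil => simp [f, f_alt, hl, PySem.List.dedup_eq_ofList, PySem.Set.ofList]
  | cons c rest =>
    simp only [f, f_alt, hl]
    rw [loopA_eq, mergeFirst_rle]
    have hR : ((c, ((1:Nat) : Int) + ((rest.takeWhile (fun y => y = c)).length : Int)) :: rle (rest.dropWhile (fun y => y = c)))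
        = rle (c :: rest) := by
      rw [rle]
      congr 2
      push_cast
      ring
    rw [hR]
    set R := rle (c :: rest) with hRdef
    set D := R.foldl step PySem.Dict.empty with hD
    have hnd : D.keys.Nodup := by
      rw [hD]
      exact PySem.Dict.nodup_keys_foldl_modify_key R (fun p => p.1) [] (fun d p v => v ++ [p.2]) _ PySem.Dict.nodup_keys_empty
    have hkeys : D.keys = PySem.Set.ofList (R.map (fun p => p.1)) := by
      rw [hD]
      unfold step
      rw [PySem.Dict.keys_foldl_modify_key]
      simp [PySem.Set.update, PySem.Set.ofList_eq_foldl, PySem.Dict.keys_empty]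
    have hget : ∀ k, D.getD k [] = runLengths k (c :: rest) := by
      intro k
      rw [hD]
      unfold step
      rw [PySem.Dict.getD_foldl_modify_append, PySem.Dict.getD_empty]
      simp [runLengths, hRdef]
    rw [PySem.Dict.items_eq_map_keys D hnd []]
    rw [hkeys, ofList_rle_chars, List.map_map]
    rw [PySem.List.dedup_eq_ofList]
    refine List.map_congr_left ?_
    intro k hk
    simp only [Function.comp]
    rw [hget k]
    -- k occurs in the string, so it owns at least one run
    have hkl : k ∈ (c :: rest) := by
      exact (PySem.Set.mem_ofList _ _).mp hk
    have hkR : k ∈ R.map (fun p => p.1) := by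
      have : k ∈ PySem.Set.ofList (R.map (fun p => p.1)) := by
        rw [ofList_rle_chars]
        exact (PySem.Set.mem_ofList _ _).mpr hkl
      exact (PySem.Set.mem_ofList _ _).mp this
    obtain ⟨p, hpR, hpk⟩ := List.mem_map.mp hkR
    have hne : runLengths k (c :: rest) ≠ [] := by
      unfold runLengths
      simp only [ne_eq, List.map_eq_nil_iff, List.filter_eq_nil_iff, not_forall]
      exact ⟨p, hpR, by simp [hpk]⟩
    cases hv : runLengths k (c :: rest) with
    | nil => exact absurd hv hne
    | cons v0 vt =>
      have hpos : 1 ≤ v0 := by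
        have hm : v0 ∈ runLengths k (c :: rest) := by rw [hv]; exact List.mem_cons_self
        unfold runLengths at hm
        obtain ⟨q, hq, rfl⟩ := List.mem_map.mp hm
        exact rle_pos _ q (List.mem_of_mem_filter hq)
      rw [PySem.List.max?_id_cons]
      rw [bestRun_eq, hv, List.foldl_cons]
      have : max (0 : Int) v0 = v0 := by omega
      rw [this]
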